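-- pv_equiv track=rewrite | github.com/microsoft/CameraTraps | benchmark/model_eval_utils.py | is_gt_seq_non_empty
-- ===== SOURCE A (Python) =====
-- def is_gt_seq_non_empty(annotations, empty_category_id):
--     """
--     True if there are animals etc, False if empty.
--     """
--     category_on_images = set()
--     for a in annotations:
--         category_on_images.add(a['category_id'])
--     if len(category_on_images) > 1:
--         return True
--     elif len(category_on_images) == 1:
--         only_cat = list(category_on_images)[0]
--         if only_cat == empty_category_id:
--             return False
--         else:
--             return True
--     else:
--         raise Exception('No category information in annotation entry.')
-- ===== SOURCE B (Python) =====
-- def is_gt_seq_non_empty(annotations, empty_category_id):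
--     """
--     True if there are animals etc, False if empty.
--     """
--     cats = [a['category_id'] for a in annotations]
--     if not cats:
--         raise Exception('No category information in annotation entry.')
--     return any(c != empty_category_id for c in cats)
-- ===== Notes on version B (the rewrite author's own statement) =====
-- stated objective: simpler
-- what changed: Replaces the distinct-category set and the three-way cardinality branching with a single existence test any(c != empty_category_id) over the list of category ids.
import Mathlib
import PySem

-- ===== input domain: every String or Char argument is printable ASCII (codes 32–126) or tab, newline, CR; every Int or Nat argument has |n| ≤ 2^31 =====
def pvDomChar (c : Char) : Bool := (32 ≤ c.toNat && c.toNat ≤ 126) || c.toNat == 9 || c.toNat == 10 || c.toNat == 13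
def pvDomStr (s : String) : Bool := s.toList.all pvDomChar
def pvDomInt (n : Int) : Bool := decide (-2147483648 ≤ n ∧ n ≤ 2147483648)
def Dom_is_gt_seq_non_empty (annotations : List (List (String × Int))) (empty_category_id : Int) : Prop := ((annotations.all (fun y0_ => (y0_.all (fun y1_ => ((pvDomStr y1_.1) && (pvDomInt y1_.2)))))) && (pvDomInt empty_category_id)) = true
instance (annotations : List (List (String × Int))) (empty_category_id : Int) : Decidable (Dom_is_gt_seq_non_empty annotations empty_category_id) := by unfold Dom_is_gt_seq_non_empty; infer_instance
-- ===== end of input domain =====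

-- B replaces A's distinct-category set and three-way cardinality branching with a single
-- existence test over the list of category ids (objective: simpler).


-- ===== PORT A =====
-- the 'for a in annotations: category_on_images.add(a['category_id'])' loop; none = KeyError
def pvACatLoop : List (List (String × Int)) → PySem.Set Int → Option (PySem.Set Int)
  | [], s => some s
  | a :: rest, s =>
    match (PySem.Dict.mk a).get? "category_id" with
    | none => none
    | some c => pvACatLoop rest (PySem.Set.add s c)

def is_gt_seq_non_empty (annotations : List (List (String × Int))) (empty_category_id : Int) : Bool :=
  match pvACatLoop annotations PySem.Set.empty with
  | none => false   -- KeyError; outside Pre_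
  | some category_on_images =>
    if 1 < category_on_images.length then true
    else if category_on_images.length = 1 then
      match category_on_images with
      | only_cat :: _ => if only_cat = empty_category_id then false else true
      | [] => false   -- unreachable (length = 1)
    else false        -- raise Exception(...); outside Pre_

-- ===== PORT B =====
def is_gt_seq_non_empty_alt (annotations : List (List (String × Int))) (empty_category_id : Int) : Bool :=
  match annotations.mapM (fun a => (PySem.Dict.mk a).get? "category_id") with
  | none => false   -- KeyError in the comprehension; outside Pre_
  | some cats =>
    if cats.isEmpty then false   -- raise Exception(...); outside Pre_
    else cats.any (fun c => decide (c ≠ empty_category_id))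

-- ===== PRECONDITION & SPEC =====
-- Pre_ excludes exactly the inputs where A raises: an empty annotations list (the explicit
-- Exception) and any annotation dict missing the 'category_id' key (KeyError).
def Pre_is_gt_seq_non_empty (annotations : List (List (String × Int))) (empty_category_id : Int) : Prop :=
  annotations ≠ [] ∧ ∀ a ∈ annotations, "category_id" ∈ a.map Prod.fst
instance (annotations : List (List (String × Int))) (empty_category_id : Int) : Decidable (Pre_is_gt_seq_non_empty annotations empty_category_id) := by unfold Pre_is_gt_seq_non_empty; infer_instance

def pvWitness_is_gt_seq_non_empty : (List (List (String × Int))) × Int :=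
  ([[("category_id", 3)], [("category_id", 0)]], 0)

def Spec_is_gt_seq_non_empty (annotations : List (List (String × Int))) (empty_category_id : Int) (out : Bool) : Prop := out = is_gt_seq_non_empty_alt annotations empty_category_id
instance (annotations : List (List (String × Int))) (empty_category_id : Int) (out : Bool) : Decidable (Spec_is_gt_seq_non_empty annotations empty_category_id out) := by unfold Spec_is_gt_seq_non_empty; infer_instance

-- ===== CLAIM (what is proved, stated in full; the proofs are below) =====
def Claim_equal_is_gt_seq_non_empty : Prop := ∀ (annotations : List (List (String × Int))) (empty_category_id : Int), Dom_is_gt_seq_non_empty annotations empty_category_id → Pre_is_gt_seq_non_empty annotations empty_category_id → Spec_is_gt_seq_non_empty annotations empty_category_id (is_gt_seq_non_empty annotations empty_category_id)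

-- ===== LEMMAS AND PROOFS =====

-- a key present in the association list makes the dict lookup succeed
lemma get?_mk_isSome (a : List (String × Int)) (h : "category_id" ∈ a.map Prod.fst) :
    ∃ c, (PySem.Dict.mk a).get? "category_id" = some c := by
  induction a with
  | nil => simp at h
  | cons p rest ih =>
    rw [PySem.Dict.get?_mk_cons]
    by_cases hp : p.1 = "category_id"
    · exact ⟨p.2, by simp [hp]⟩
    · simp only [List.map_cons, List.mem_cons] at h
      rcases h with h | h
      · exact absurd h.symm hp
      · simpa [beq_iff_eq, hp] using ih h

-- both loops succeed under Pre_ and are related: A's set is B's list folded with Set.add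
lemma loops_eq (ann : List (List (String × Int))) (s : PySem.Set Int)
    (h : ∀ a ∈ ann, "category_id" ∈ a.map Prod.fst) :
    ∃ cs, ann.mapM (fun a => (PySem.Dict.mk a).get? "category_id") = some cs ∧
          pvACatLoop ann s = some (cs.foldl PySem.Set.add s) ∧
          cs.length = ann.length := by
  induction ann generalizing s with
  | nil => exact ⟨[], rfl, rfl, rfl⟩
  | cons a rest ih =>
    obtain ⟨c, hc⟩ := get?_mk_isSome a (h a (by simp))
    obtain ⟨cs, h1, h2, h3⟩ := ih (PySem.Set.add s c) (fun x hx => h x (by simp [hx]))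
    exact ⟨c :: cs, by simp [List.mapM_cons, hc, h1], by simp [pvACatLoop, hc, h2],
      by simp [h3]⟩

-- if every element of a nonempty list equals c0, 'any (· ≠ e)' is 'c0 ≠ e'
lemma any_of_all_eq (cs : List Int) (c0 e : Int) (hne : cs ≠ [])
    (hall : ∀ c ∈ cs, c = c0) :
    cs.any (fun c => decide (c ≠ e)) = decide (c0 ≠ e) := by
  induction cs with
  | nil => exact absurd rfl hne
  | cons x xs ih =>
    rw [List.any_cons, hall x (by simp)]
    cases xs with
    | nil => simp
    | cons y ys =>
      rw [ih (by simp) (fun c hc => hall c (by simp [hc]))]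
      exact Bool.or_self _

-- ===== VERDICT =====
theorem is_gt_seq_non_empty_spec : Claim_equal_is_gt_seq_non_empty := by
  intro ann e _ hpre
  unfold Spec_is_gt_seq_non_empty
  obtain ⟨hne, hkeys⟩ := hpre
  obtain ⟨cs, h1, h2, h3⟩ := loops_eq ann PySem.Set.empty hkeys
  have hcsne : cs ≠ [] := by
    intro h; apply hne
    cases ann with
    | nil => rfl
    | cons a r => simp [h] at h3
  unfold is_gt_seq_non_empty is_gt_seq_non_empty_alt
  rw [h1, h2]
  have hfold : cs.foldl PySem.Set.add PySem.Set.empty = PySem.Set.ofList cs := by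
    rw [PySem.Set.ofList_eq_foldl]; rfl
  rw [hfold]
  have hmem : ∀ x, x ∈ PySem.Set.ofList cs ↔ x ∈ cs :=
    fun x => PySem.Set.mem_ofList cs x
  have hemp : cs.isEmpty = false := by simp [hcsne]
  simp only [hemp, Bool.false_eq_true, if_false]
  rcases hs : PySem.Set.ofList cs with _ | ⟨c0, srest⟩
  · -- empty set but cs nonempty: impossible
    exfalso
    cases cs with
    | nil => exact hcsne rfl
    | cons x xs => have := (hmem x).2 (by simp); rw [hs] at this; simp at this
  · rcases srest with _ | ⟨c1, srest2⟩
    · -- exactly one distinct category c0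
      rw [if_neg (by simp), if_pos (by simp)]
      have hall : ∀ c ∈ cs, c = c0 := by
        intro c hc
        have := (hmem c).2 hc
        rw [hs] at this; simpa using this
      rw [any_of_all_eq cs c0 e hcsne hall]
      by_cases h0 : c0 = e <;> simp [h0]
    · -- at least two distinct categories: some one differs from e
      rw [if_pos (by simp)]
      have hnodup : (PySem.Set.ofList cs).Nodup := PySem.Set.nodup_ofList cs
      rw [hs] at hnodup
      have hne01 : c0 ≠ c1 := by
        intro h; rw [h] at hnodup; simp at hnodup
      have h0 : c0 ∈ cs := (hmem c0).1 (by rw [hs]; simp)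
      have h1' : c1 ∈ cs := (hmem c1).1 (by rw [hs]; simp)
      symm
      rw [List.any_eq_true]
      by_cases hc0 : c0 = e
      · exact ⟨c1, h1', by simp [hc0 ▸ hne01.symm]⟩
      · exact ⟨c0, h0, by simp [hc0]⟩
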